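-- pv_equiv track=rewrite | github.com/jeremysmission/HybridRAG_V2 | src/query/entity_retriever.py | _normalize_entity_type
-- ===== SOURCE A (Python) =====
-- VALID_ENTITY_TYPES = {"PERSON", "PART", "SITE", "DATE", "PO", "ORG", "CONTACT"}
--
-- def _normalize_entity_type(raw: str, query: str) -> str | None:
--     """Map free-form router labels onto the structured-store schema."""
--     if raw:
--         upper = raw.strip().upper()
--         if upper in VALID_ENTITY_TYPES:
--             return upper
--
--     value = " ".join((raw or "").lower().split())
--     q = query.lower()
--
--     if any(token in value or token in q for token in ("contact", "email", "phone")):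
--         return "CONTACT"
--     if any(
--         token in value or token in q
--         for token in ("purchase order", "po-", "po ", "requisition")
--     ):
--         return "PO"
--     if any(
--         token in value or token in q
--         for token in ("site", "location", "destination", "observatory", "air base")
--     ):
--         return "SITE"
--     if any(
--         token in value or token in q
--         for token in ("part", "module", "card", "board", "serial")
--     ):
--         return "PART"
--     if any(
--         token in value or token in q
--         for token in (
--             "person",
--             "technician",
--             "requestor",
--             "point of contact",
--             "field technician",
--             "requested parts",
--         )
--     ):
--         return "PERSON"
--     if "date" in value or "scheduled" in q:
--         return "DATE"
--     if any(token in value for token in ("org", "organization", "team")):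
--         return "ORG"
--     return None
-- ===== SOURCE B (Python) =====
-- VALID_ENTITY_TYPES = {"PERSON", "PART", "SITE", "DATE", "PO", "ORG", "CONTACT"}
--
-- # Flat inverted index: token -> entity type, for tokens searched in the
-- # normalized label ("value") and in the lowered query ("q") respectively.
-- _VALUE_TOKENS = (
--     ("contact", "CONTACT"), ("email", "CONTACT"), ("phone", "CONTACT"),
--     ("purchase order", "PO"), ("po-", "PO"), ("po ", "PO"), ("requisition", "PO"),
--     ("site", "SITE"), ("location", "SITE"), ("destination", "SITE"),
--     ("observatory", "SITE"), ("air base", "SITE"),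
--     ("part", "PART"), ("module", "PART"), ("card", "PART"),
--     ("board", "PART"), ("serial", "PART"),
--     ("person", "PERSON"), ("technician", "PERSON"), ("requestor", "PERSON"),
--     ("point of contact", "PERSON"), ("field technician", "PERSON"),
--     ("requested parts", "PERSON"),
--     ("date", "DATE"),
--     ("org", "ORG"), ("organization", "ORG"), ("team", "ORG"),
-- )
-- _QUERY_TOKENS = (
--     ("contact", "CONTACT"), ("email", "CONTACT"), ("phone", "CONTACT"),
--     ("purchase order", "PO"), ("po-", "PO"), ("po ", "PO"), ("requisition", "PO"),
--     ("site", "SITE"), ("location", "SITE"), ("destination", "SITE"),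
--     ("observatory", "SITE"), ("air base", "SITE"),
--     ("part", "PART"), ("module", "PART"), ("card", "PART"),
--     ("board", "PART"), ("serial", "PART"),
--     ("person", "PERSON"), ("technician", "PERSON"), ("requestor", "PERSON"),
--     ("point of contact", "PERSON"), ("field technician", "PERSON"),
--     ("requested parts", "PERSON"),
--     ("scheduled", "DATE"),
-- )
-- _PRIORITY = ("CONTACT", "PO", "SITE", "PART", "PERSON", "DATE", "ORG")
--
--
-- def _normalize_entity_type(raw: str, query: str) -> str | None:
--     """Map free-form router labels onto the structured-store schema."""
--     if raw:
--         upper = raw.strip().upper()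
--         if upper in VALID_ENTITY_TYPES:
--             return upper
--
--     value = " ".join((raw or "").lower().split())
--     q = query.lower()
--
--     # Stage 1: collect EVERY entity type hit by any token (no short-circuit).
--     hits = {t for tok, t in _VALUE_TOKENS if tok in value}
--     hits.update(t for tok, t in _QUERY_TOKENS if tok in q)
--     # Stage 2: select the highest-priority hit.
--     return next((t for t in _PRIORITY if t in hits), None)
-- ===== Notes on version B (the rewrite author's own statement) =====
-- stated objective: alternative
-- what changed: Replaces A's ordered short-circuit branch cascade with a two-stage algorithm: one full pass over a flat token->entity-type inverted index collects the set of ALL matching types (value-searched and query-searched tokens listed separately), then the highest-priority hit is selected from that set; no rule short-circuits and what is maintained is a hit set rather than a control-flow position.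
import Mathlib
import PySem

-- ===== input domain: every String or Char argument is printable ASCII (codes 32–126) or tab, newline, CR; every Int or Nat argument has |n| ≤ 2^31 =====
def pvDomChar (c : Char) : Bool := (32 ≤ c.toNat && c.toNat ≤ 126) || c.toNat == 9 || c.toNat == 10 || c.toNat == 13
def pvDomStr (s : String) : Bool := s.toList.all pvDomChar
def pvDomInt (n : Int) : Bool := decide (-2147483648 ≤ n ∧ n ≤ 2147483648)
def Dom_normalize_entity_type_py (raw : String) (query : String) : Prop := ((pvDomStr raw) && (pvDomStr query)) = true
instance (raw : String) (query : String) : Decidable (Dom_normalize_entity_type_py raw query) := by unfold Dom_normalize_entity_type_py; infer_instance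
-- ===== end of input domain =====

-- B replaces A's ordered short-circuit branch cascade by two stages: a full pass over a flat
-- token->type inverted index collecting the SET of all matching entity types, then selection
-- of the highest-priority hit; objective: alternative decomposition, same cost.


-- ===== PORT A =====
-- `upper in VALID_ENTITY_TYPES`: the set of 7 literals, membership as list containment
def validEntityTypes : List String :=
  ["PERSON", "PART", "SITE", "DATE", "PO", "ORG", "CONTACT"]

def normalize_entity_type_py (raw : String) (query : String) : Option String :=
  let upper := PySem.Str.upper (PySem.Str.strip raw)
  if raw.toList ≠ [] && validEntityTypes.contains upper then
    some upper
  else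
    let value := PySem.Str.join " " (PySem.Str.split₀ (PySem.Str.lower raw))
    let q := PySem.Str.lower query
    if ["contact", "email", "phone"].any
        (fun t => PySem.Str.isIn t value || PySem.Str.isIn t q) then some "CONTACT"
    else if ["purchase order", "po-", "po ", "requisition"].any
        (fun t => PySem.Str.isIn t value || PySem.Str.isIn t q) then some "PO"
    else if ["site", "location", "destination", "observatory", "air base"].any
        (fun t => PySem.Str.isIn t value || PySem.Str.isIn t q) then some "SITE"
    else if ["part", "module", "card", "board", "serial"].any
        (fun t => PySem.Str.isIn t value || PySem.Str.isIn t q) then some "PART"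
    else if ["person", "technician", "requestor", "point of contact",
             "field technician", "requested parts"].any
        (fun t => PySem.Str.isIn t value || PySem.Str.isIn t q) then some "PERSON"
    else if PySem.Str.isIn "date" value || PySem.Str.isIn "scheduled" q then some "DATE"
    else if ["org", "organization", "team"].any
        (fun t => PySem.Str.isIn t value) then some "ORG"
    else none

-- ===== PORT B =====
-- flat inverted index token -> entity type, tokens searched in `value`
def valueTokenIndex : List (String × String) :=
  [("contact", "CONTACT"), ("email", "CONTACT"), ("phone", "CONTACT"),
   ("purchase order", "PO"), ("po-", "PO"), ("po ", "PO"), ("requisition", "PO"),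
   ("site", "SITE"), ("location", "SITE"), ("destination", "SITE"),
   ("observatory", "SITE"), ("air base", "SITE"),
   ("part", "PART"), ("module", "PART"), ("card", "PART"),
   ("board", "PART"), ("serial", "PART"),
   ("person", "PERSON"), ("technician", "PERSON"), ("requestor", "PERSON"),
   ("point of contact", "PERSON"), ("field technician", "PERSON"),
   ("requested parts", "PERSON"),
   ("date", "DATE"),
   ("org", "ORG"), ("organization", "ORG"), ("team", "ORG")]

-- flat inverted index token -> entity type, tokens searched in `q`
def queryTokenIndex : List (String × String) :=
  [("contact", "CONTACT"), ("email", "CONTACT"), ("phone", "CONTACT"),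
   ("purchase order", "PO"), ("po-", "PO"), ("po ", "PO"), ("requisition", "PO"),
   ("site", "SITE"), ("location", "SITE"), ("destination", "SITE"),
   ("observatory", "SITE"), ("air base", "SITE"),
   ("part", "PART"), ("module", "PART"), ("card", "PART"),
   ("board", "PART"), ("serial", "PART"),
   ("person", "PERSON"), ("technician", "PERSON"), ("requestor", "PERSON"),
   ("point of contact", "PERSON"), ("field technician", "PERSON"),
   ("requested parts", "PERSON"),
   ("scheduled", "DATE")]

def priorityOrder : List String :=
  ["CONTACT", "PO", "SITE", "PART", "PERSON", "DATE", "ORG"]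

def normalize_entity_type_py_alt (raw : String) (query : String) : Option String :=
  let upper := PySem.Str.upper (PySem.Str.strip raw)
  if raw.toList ≠ [] && validEntityTypes.contains upper then
    some upper
  else
    let value := PySem.Str.join " " (PySem.Str.split₀ (PySem.Str.lower raw))
    let q := PySem.Str.lower query
    -- stage 1: the set of ALL matching entity types (no short-circuit)
    let hits := PySem.Set.update
      (PySem.Set.ofList (valueTokenIndex.filterMap
        (fun p => if PySem.Str.isIn p.1 value then some p.2 else none)))
      (queryTokenIndex.filterMap
        (fun p => if PySem.Str.isIn p.1 q then some p.2 else none))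
    -- stage 2: first entity type in priority order that was hit
    priorityOrder.find? (fun t => PySem.Set.contains hits t)

-- ===== PRECONDITION & SPEC =====
def Spec_normalize_entity_type_py (raw : String) (query : String) (out : Option String) : Prop := out = normalize_entity_type_py_alt raw query
instance (raw : String) (query : String) (out : Option String) : Decidable (Spec_normalize_entity_type_py raw query out) := by unfold Spec_normalize_entity_type_py; infer_instance

-- ===== CLAIM (what is proved, stated in full; the proofs are below) =====
def Claim_equal_normalize_entity_type_py : Prop := ∀ (raw : String) (query : String), Dom_normalize_entity_type_py raw query → Spec_normalize_entity_type_py raw query (normalize_entity_type_py raw query)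

-- ===== LEMMAS AND PROOFS =====
-- membership in B's hit set, per entity type: `t ∈ hits` unfolds to the disjunction of the
-- token tests whose index entry carries t (proved by enumerating the two literal indices)
theorem contains_hits (v q t : String) :
    PySem.Set.contains
      (PySem.Set.update
        (PySem.Set.ofList (valueTokenIndex.filterMap
          (fun p => if PySem.Str.isIn p.1 v then some p.2 else none)))
        (queryTokenIndex.filterMap
          (fun p => if PySem.Str.isIn p.1 q then some p.2 else none))) t
    = ((valueTokenIndex.filterMap
          (fun p => if PySem.Str.isIn p.1 v then some p.2 else none)).contains t
       || (queryTokenIndex.filterMap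
          (fun p => if PySem.Str.isIn p.1 q then some p.2 else none)).contains t) := by
  rw [Bool.eq_iff_iff]
  simp only [Bool.or_eq_true, PySem.Set.contains_iff,
    PySem.Set.mem_update, PySem.Set.mem_ofList, List.contains_iff_mem]

-- any over (t in value || t in q) distributes into two independent any-scans
theorem any_isIn_or (v q : String) (toks : List String) :
    toks.any (fun t => PySem.Str.isIn t v || PySem.Str.isIn t q)
      = (toks.any (fun t => PySem.Str.isIn t v) || toks.any (fun t => PySem.Str.isIn t q)) := by
  induction toks with
  | nil => rfl
  | cons h t ih =>
    simp only [List.any_cons, ih]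
    cases PySem.Str.isIn h v <;> cases PySem.Str.isIn h q <;> simp

-- contains of a conditional filterMap over the index is an any-scan of the index
theorem contains_filterMap {α : Type} (L : List (α × String)) (c : α × String → Bool) (t : String) :
    (L.filterMap (fun p => if c p then some p.2 else none)).contains t
      = L.any (fun p => c p && p.2 == t) := by
  rw [Bool.eq_iff_iff]
  simp [List.mem_filterMap]

-- one step of B's priority scan, as an if
theorem find?_cons_if {α : Type} (p : α → Bool) (a : α) (l : List α) :
    List.find? p (a :: l) = if p a then some a else List.find? p l := by
  cases h : p a <;> simp [h]

theorem hits_CONTACT (value q : String) :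
    PySem.Set.contains
      (PySem.Set.update
        (PySem.Set.ofList (valueTokenIndex.filterMap
          (fun p => if PySem.Str.isIn p.1 value then some p.2 else none)))
        (queryTokenIndex.filterMap
          (fun p => if PySem.Str.isIn p.1 q then some p.2 else none))) "CONTACT"
    = (["contact", "email", "phone"].any (fun t => PySem.Str.isIn t value)
       || ["contact", "email", "phone"].any (fun t => PySem.Str.isIn t q)) := by
  rw [contains_hits, contains_filterMap, contains_filterMap, Bool.eq_iff_iff]
  simp [valueTokenIndex, queryTokenIndex]

theorem hits_PO (value q : String) :
    PySem.Set.contains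
      (PySem.Set.update
        (PySem.Set.ofList (valueTokenIndex.filterMap
          (fun p => if PySem.Str.isIn p.1 value then some p.2 else none)))
        (queryTokenIndex.filterMap
          (fun p => if PySem.Str.isIn p.1 q then some p.2 else none))) "PO"
    = (["purchase order", "po-", "po ", "requisition"].any (fun t => PySem.Str.isIn t value)
       || ["purchase order", "po-", "po ", "requisition"].any (fun t => PySem.Str.isIn t q)) := by
  rw [contains_hits, contains_filterMap, contains_filterMap, Bool.eq_iff_iff]
  simp [valueTokenIndex, queryTokenIndex]

theorem hits_SITE (value q : String) :
    PySem.Set.contains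
      (PySem.Set.update
        (PySem.Set.ofList (valueTokenIndex.filterMap
          (fun p => if PySem.Str.isIn p.1 value then some p.2 else none)))
        (queryTokenIndex.filterMap
          (fun p => if PySem.Str.isIn p.1 q then some p.2 else none))) "SITE"
    = (["site", "location", "destination", "observatory", "air base"].any (fun t => PySem.Str.isIn t value)
       || ["site", "location", "destination", "observatory", "air base"].any (fun t => PySem.Str.isIn t q)) := by
  rw [contains_hits, contains_filterMap, contains_filterMap, Bool.eq_iff_iff]
  simp [valueTokenIndex, queryTokenIndex]

theorem hits_PART (value q : String) :
    PySem.Set.contains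
      (PySem.Set.update
        (PySem.Set.ofList (valueTokenIndex.filterMap
          (fun p => if PySem.Str.isIn p.1 value then some p.2 else none)))
        (queryTokenIndex.filterMap
          (fun p => if PySem.Str.isIn p.1 q then some p.2 else none))) "PART"
    = (["part", "module", "card", "board", "serial"].any (fun t => PySem.Str.isIn t value)
       || ["part", "module", "card", "board", "serial"].any (fun t => PySem.Str.isIn t q)) := by
  rw [contains_hits, contains_filterMap, contains_filterMap, Bool.eq_iff_iff]
  simp [valueTokenIndex, queryTokenIndex]

theorem hits_PERSON (value q : String) :
    PySem.Set.contains
      (PySem.Set.update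
        (PySem.Set.ofList (valueTokenIndex.filterMap
          (fun p => if PySem.Str.isIn p.1 value then some p.2 else none)))
        (queryTokenIndex.filterMap
          (fun p => if PySem.Str.isIn p.1 q then some p.2 else none))) "PERSON"
    = (["person", "technician", "requestor", "point of contact", "field technician", "requested parts"].any (fun t => PySem.Str.isIn t value)
       || ["person", "technician", "requestor", "point of contact", "field technician", "requested parts"].any (fun t => PySem.Str.isIn t q)) := by
  rw [contains_hits, contains_filterMap, contains_filterMap, Bool.eq_iff_iff]
  simp [valueTokenIndex, queryTokenIndex]

theorem hits_DATE (value q : String) :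
    PySem.Set.contains
      (PySem.Set.update
        (PySem.Set.ofList (valueTokenIndex.filterMap
          (fun p => if PySem.Str.isIn p.1 value then some p.2 else none)))
        (queryTokenIndex.filterMap
          (fun p => if PySem.Str.isIn p.1 q then some p.2 else none))) "DATE"
    = (PySem.Str.isIn "date" value || PySem.Str.isIn "scheduled" q) := by
  rw [contains_hits, contains_filterMap, contains_filterMap, Bool.eq_iff_iff]
  simp [valueTokenIndex, queryTokenIndex]

theorem hits_ORG (value q : String) :
    PySem.Set.contains
      (PySem.Set.update
        (PySem.Set.ofList (valueTokenIndex.filterMap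
          (fun p => if PySem.Str.isIn p.1 value then some p.2 else none)))
        (queryTokenIndex.filterMap
          (fun p => if PySem.Str.isIn p.1 q then some p.2 else none))) "ORG"
    = (["org", "organization", "team"].any (fun t => PySem.Str.isIn t value)) := by
  rw [contains_hits, contains_filterMap, contains_filterMap, Bool.eq_iff_iff]
  simp [valueTokenIndex, queryTokenIndex]

-- ===== VERDICT (by name: the statement is the Claim_ definition above) =====
theorem normalize_entity_type_py_spec : Claim_equal_normalize_entity_type_py := by
  intro raw query _
  unfold Spec_normalize_entity_type_py normalize_entity_type_py normalize_entity_type_py_alt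
  dsimp only
  split
  · rfl
  · generalize PySem.Str.join " " (PySem.Str.split₀ (PySem.Str.lower raw)) = value
    generalize PySem.Str.lower query = q
    simp only [any_isIn_or, priorityOrder, find?_cons_if, List.find?_nil,
      hits_CONTACT, hits_PO, hits_SITE, hits_PART, hits_PERSON, hits_DATE, hits_ORG]
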